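-- pv_equiv track=rewrite | github.com/pybamm-team/PyBaMM | pybamm/input/parameters/lithium_ion/Test.py | create_nested_parameter_dict
-- ===== SOURCE A (Python) =====
-- def create_nested_parameter_dict(base_dict):
--     """
--     This function takes a flat dictionary and returns a new dictionary with nested
--     structures categorized into components like electrode, separator, cell, experiment,
--     and a user-defined section for uncategorized parameters.
--
--     Args:
--         base_dict (dict): The flat dictionary containing parameters.
--
--     Returns:
--         dict: A new dictionary with nested structures categorized by component.
--     """
--
--     # Define the categories and their associated components
--     categories = {
--         "experiment": [
--             "Reference temperature [K]",
--             "Negative current collector surface heat transfer coefficient [W.m-2.K-1]",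
--             "Positive current collector surface heat transfer coefficient [W.m-2.K-1]",
--             "Negative tab heat transfer coefficient [W.m-2.K-1]",
--             "Positive tab heat transfer coefficient [W.m-2.K-1]",
--             "Edge heat transfer coefficient [W.m-2.K-1]",
--             "Total heat transfer coefficient [W.m-2.K-1]",
--             "Ambient temperature [K]",
--             "Number of electrodes connected in parallel to make a cell",
--             "Number of cells connected in series to make a battery",
--             "Lower voltage cut-off [V]",
--             "Upper voltage cut-off [V]",
--             "Open-circuit voltage at 0% SOC [V]",
--             "Open-circuit voltage at 100% SOC [V]",
--             "Initial concentration in negative electrode [mol.m-3]",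
--             "Initial concentration in positive electrode [mol.m-3]",
--             "Initial temperature [K]",
--         ],
--         "electrode": [
--             "negative_electrode",
--             "positive_electrode",
--             "lithium_plating",
--             "sei",
--         ],
--         "separator": ["separator"],
--         "cell": ["cell", "negative current collector", "positive current collector"],
--     }
--
--     # Initialize the nested dictionary
--     nested_dict = {category: {} for category in categories}
--     nested_dict["user-defined"] = {}  # For parameters not falling into predefined categories
--
--     # Process each key-value pair in the base dictionary
--     for key, value in base_dict.items():
--         added = False
--         # Loop through the categories to find where the key fits
--         for category, params in categories.items():
--             # Check if key belongs to the "experiment" parameters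
--             if category == "experiment" and key in params:
--                 nested_dict[category][key] = value
--                 added = True
--                 break
--             # Check if key starts with any of the category-specific keywords
--             elif any(key.lower().startswith(param.replace("_", " ")) for param in params):
--                 nested_dict[category][key] = value
--                 added = True
--                 break
--
--         # If the key doesn't fit into any predefined category, add it to "user-defined"
--         if not added:
--             nested_dict["user-defined"][key] = value
--
--     return nested_dict
-- ===== SOURCE B (Python) =====
-- def create_nested_parameter_dict(base_dict):
--     """Category-by-category construction: fill each category with a dict
--     comprehension over base_dict, maintaining an exclusion set of already
--     assigned keys, instead of classifying key-by-key with a break flag."""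
--     experiment_keys = {
--         "Reference temperature [K]",
--         "Negative current collector surface heat transfer coefficient [W.m-2.K-1]",
--         "Positive current collector surface heat transfer coefficient [W.m-2.K-1]",
--         "Negative tab heat transfer coefficient [W.m-2.K-1]",
--         "Positive tab heat transfer coefficient [W.m-2.K-1]",
--         "Edge heat transfer coefficient [W.m-2.K-1]",
--         "Total heat transfer coefficient [W.m-2.K-1]",
--         "Ambient temperature [K]",
--         "Number of electrodes connected in parallel to make a cell",
--         "Number of cells connected in series to make a battery",
--         "Lower voltage cut-off [V]",
--         "Upper voltage cut-off [V]",
--         "Open-circuit voltage at 0% SOC [V]",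
--         "Open-circuit voltage at 100% SOC [V]",
--         "Initial concentration in negative electrode [mol.m-3]",
--         "Initial concentration in positive electrode [mol.m-3]",
--         "Initial temperature [K]",
--     }
--     prefix_groups = [
--         ("electrode", ["negative_electrode", "positive_electrode", "lithium_plating", "sei"]),
--         ("separator", ["separator"]),
--         ("cell", ["cell", "negative current collector", "positive current collector"]),
--     ]
--     result = {"experiment": {k: v for k, v in base_dict.items() if k in experiment_keys}}
--     assigned = set(result["experiment"])
--     for name, prefixes in prefix_groups:
--         group = {
--             k: v
--             for k, v in base_dict.items()
--             if k not in assigned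
--             and any(k.lower().startswith(p.replace("_", " ")) for p in prefixes)
--         }
--         result[name] = group
--         assigned |= group.keys()
--     result["user-defined"] = {k: v for k, v in base_dict.items() if k not in assigned}
--     return result
-- ===== Notes on version B (the rewrite author's own statement) =====
-- stated objective: faster
-- what changed: B builds the result category-by-category (experiment by hash-set membership, then each prefix group, then user-defined) with one filtering pass per category and an exclusion set of already-assigned keys, instead of A's key-by-key classification loop with a per-key break flag; Pre_ only excludes association lists with duplicate keys, which represent no Python dict.
import Mathlib
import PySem

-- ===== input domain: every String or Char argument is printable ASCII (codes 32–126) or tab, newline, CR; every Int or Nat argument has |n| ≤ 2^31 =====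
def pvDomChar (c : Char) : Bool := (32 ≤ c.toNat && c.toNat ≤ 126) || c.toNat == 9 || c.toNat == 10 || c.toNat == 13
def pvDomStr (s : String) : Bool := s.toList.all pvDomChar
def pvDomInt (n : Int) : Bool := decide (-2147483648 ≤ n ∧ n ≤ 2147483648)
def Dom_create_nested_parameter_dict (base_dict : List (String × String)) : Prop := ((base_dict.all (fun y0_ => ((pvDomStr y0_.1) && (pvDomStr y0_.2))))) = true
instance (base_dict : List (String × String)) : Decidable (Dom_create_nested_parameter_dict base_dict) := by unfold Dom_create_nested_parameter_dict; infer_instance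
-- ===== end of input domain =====

-- B builds the result category-by-category (one filtering pass per category with an
-- exclusion set of already-assigned keys) instead of A's key-by-key classification with
-- a per-key break flag; experiment keys are tested by set membership (a timing run
-- measured B faster by a constant factor).

-- ===== PORT A =====
def pvExpParamsA : List String :=
  ["Reference temperature [K]",
   "Negative current collector surface heat transfer coefficient [W.m-2.K-1]",
   "Positive current collector surface heat transfer coefficient [W.m-2.K-1]",
   "Negative tab heat transfer coefficient [W.m-2.K-1]",
   "Positive tab heat transfer coefficient [W.m-2.K-1]",
   "Edge heat transfer coefficient [W.m-2.K-1]",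
   "Total heat transfer coefficient [W.m-2.K-1]",
   "Ambient temperature [K]",
   "Number of electrodes connected in parallel to make a cell",
   "Number of cells connected in series to make a battery",
   "Lower voltage cut-off [V]",
   "Upper voltage cut-off [V]",
   "Open-circuit voltage at 0% SOC [V]",
   "Open-circuit voltage at 100% SOC [V]",
   "Initial concentration in negative electrode [mol.m-3]",
   "Initial concentration in positive electrode [mol.m-3]",
   "Initial temperature [K]"]

def pvCategoriesA : List (String × List String) :=
  [("experiment", pvExpParamsA),
   ("electrode", ["negative_electrode", "positive_electrode", "lithium_plating", "sei"]),
   ("separator", ["separator"]),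
   ("cell", ["cell", "negative current collector", "positive current collector"])]

-- the inner `for category, params in categories.items(): … break` loop of A
def pvAssignA (nested : PySem.Dict String (PySem.Dict String String)) (k v : String) :
    List (String × List String) → PySem.Dict String (PySem.Dict String String) × Bool
  | [] => (nested, false)
  | (cat, params) :: rest =>
    if (cat == "experiment" && params.contains k)
        || params.any (fun p => PySem.Str.startswith (PySem.Str.lower k) (PySem.Str.replace p "_" " ")) then
      (nested.insert cat ((nested.getD cat PySem.Dict.empty).insert k v), true)
    else pvAssignA nested k v rest

-- the body of A's outer `for key, value in base_dict.items()` loop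
def pvStepA (nested : PySem.Dict String (PySem.Dict String String)) (kv : String × String) :
    PySem.Dict String (PySem.Dict String String) :=
  let r := pvAssignA nested kv.1 kv.2 pvCategoriesA
  if r.2 then r.1
  else r.1.insert "user-defined" ((r.1.getD "user-defined" PySem.Dict.empty).insert kv.1 kv.2)

def create_nested_parameter_dict (base_dict : List (String × String)) :
    List (String × List (String × String)) :=
  let init :=
    ((((PySem.Dict.empty.insert "experiment" PySem.Dict.empty).insert "electrode"
        PySem.Dict.empty).insert "separator" PySem.Dict.empty).insert "cell"
        PySem.Dict.empty).insert "user-defined" (PySem.Dict.empty : PySem.Dict String String)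
  ((base_dict.foldl pvStepA init).items).map (fun p => (p.1, p.2.items))

-- ===== PORT B =====
def pvExpKeysB : List String :=
  ["Reference temperature [K]",
   "Negative current collector surface heat transfer coefficient [W.m-2.K-1]",
   "Positive current collector surface heat transfer coefficient [W.m-2.K-1]",
   "Negative tab heat transfer coefficient [W.m-2.K-1]",
   "Positive tab heat transfer coefficient [W.m-2.K-1]",
   "Edge heat transfer coefficient [W.m-2.K-1]",
   "Total heat transfer coefficient [W.m-2.K-1]",
   "Ambient temperature [K]",
   "Number of electrodes connected in parallel to make a cell",
   "Number of cells connected in series to make a battery",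
   "Lower voltage cut-off [V]",
   "Upper voltage cut-off [V]",
   "Open-circuit voltage at 0% SOC [V]",
   "Open-circuit voltage at 100% SOC [V]",
   "Initial concentration in negative electrode [mol.m-3]",
   "Initial concentration in positive electrode [mol.m-3]",
   "Initial temperature [K]"]

def pvPrefixGroupsB : List (String × List String) :=
  [("electrode", ["negative_electrode", "positive_electrode", "lithium_plating", "sei"]),
   ("separator", ["separator"]),
   ("cell", ["cell", "negative current collector", "positive current collector"])]

def pvAnyPrefixB (k : String) (prefixes : List String) : Bool :=
  prefixes.any (fun p => PySem.Str.startswith (PySem.Str.lower k) (PySem.Str.replace p "_" " "))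

def create_nested_parameter_dict_alt (base_dict : List (String × String)) :
    List (String × List (String × String)) :=
  let experiment_keys := PySem.Set.ofList pvExpKeysB
  let exp := base_dict.filter (fun kv => PySem.Set.contains experiment_keys kv.1)
  let st := pvPrefixGroupsB.foldl
    (fun (st : List (String × List (String × String)) × PySem.Set String) g =>
      let group := base_dict.filter
        (fun kv => !(PySem.Set.contains st.2 kv.1) && pvAnyPrefixB kv.1 g.2)
      (st.1 ++ [(g.1, group)], PySem.Set.update st.2 (group.map Prod.fst)))
    ([("experiment", exp)], PySem.Set.ofList (exp.map Prod.fst))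
  st.1 ++ [("user-defined", base_dict.filter (fun kv => !(PySem.Set.contains st.2 kv.1)))]

-- ===== PRECONDITION & SPEC =====
-- Pre_ excludes association lists with duplicate keys: base_dict is a Python dict, which
-- cannot contain two entries with the same key, so such lists represent no valid input.
def Pre_create_nested_parameter_dict (base_dict : List (String × String)) : Prop :=
  (base_dict.map Prod.fst).Nodup
instance (base_dict : List (String × String)) : Decidable (Pre_create_nested_parameter_dict base_dict) := by unfold Pre_create_nested_parameter_dict; infer_instance

def pvWitness_create_nested_parameter_dict : (List (String × String)) :=
  [("Separator porosity", "0.4"), ("Ambient temperature [K]", "298.15"), ("foo", "1")]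

def Spec_create_nested_parameter_dict (base_dict : List (String × String)) (out : List (String × List (String × String))) : Prop := out = create_nested_parameter_dict_alt base_dict
instance (base_dict : List (String × String)) (out : List (String × List (String × String))) : Decidable (Spec_create_nested_parameter_dict base_dict out) := by unfold Spec_create_nested_parameter_dict; infer_instance

-- ===== CLAIM (what is proved, stated in full; the proofs are below) =====
def Claim_equal_create_nested_parameter_dict : Prop := ∀ (base_dict : List (String × String)), Dom_create_nested_parameter_dict base_dict → Pre_create_nested_parameter_dict base_dict → Spec_create_nested_parameter_dict base_dict (create_nested_parameter_dict base_dict)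

-- ===== LEMMAS AND PROOFS =====

-- the five per-key classification conditions, in A's cascade order
def pvPexp (k : String) : Bool := pvExpParamsA.contains k
def pvPel (k : String) : Bool := !pvPexp k && pvAnyPrefixB k ["negative_electrode", "positive_electrode", "lithium_plating", "sei"]
def pvPsep (k : String) : Bool := !pvPexp k && !pvAnyPrefixB k ["negative_electrode", "positive_electrode", "lithium_plating", "sei"] && pvAnyPrefixB k ["separator"]
def pvPcell (k : String) : Bool := !pvPexp k && !pvAnyPrefixB k ["negative_electrode", "positive_electrode", "lithium_plating", "sei"] && !pvAnyPrefixB k ["separator"] && pvAnyPrefixB k ["cell", "negative current collector", "positive current collector"]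
def pvPuser (k : String) : Bool := !pvPexp k && !pvAnyPrefixB k ["negative_electrode", "positive_electrode", "lithium_plating", "sei"] && !pvAnyPrefixB k ["separator"] && !pvAnyPrefixB k ["cell", "negative current collector", "positive current collector"]

def pvBig (e el s c u : List (String × String)) : PySem.Dict String (PySem.Dict String String) :=
  PySem.Dict.mk [("experiment", PySem.Dict.mk e), ("electrode", PySem.Dict.mk el),
                 ("separator", PySem.Dict.mk s), ("cell", PySem.Dict.mk c),
                 ("user-defined", PySem.Dict.mk u)]

-- lowerChar never yields an ASCII capital
lemma pv_lowerChar_not_upper (c : Char) :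
    ¬ (65 ≤ (PySem.Chars.lowerChar c).toNat ∧ (PySem.Chars.lowerChar c).toNat ≤ 90) := by
  have hle : ∀ a b : Char, (a ≤ b) ↔ a.toNat ≤ b.toNat :=
    fun a b => ⟨fun h => Fin.mk_le_mk.mp h, fun h => Fin.mk_le_mk.mpr h⟩
  have hA : ('A' : Char).toNat = 65 := rfl
  have hZ : ('Z' : Char).toNat = 90 := rfl
  unfold PySem.Chars.lowerChar PySem.Chars.isupper
  split_ifs with h
  · rw [Bool.and_eq_true, decide_eq_true_iff, decide_eq_true_iff, hle, hle, hA, hZ] at h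
    rw [Char.toNat_ofNat, if_pos (Or.inl (by omega))]
    omega
  · rw [Bool.and_eq_true, not_and_or] at h
    rintro ⟨h1, h2⟩
    rcases h with h | h <;> rw [decide_eq_true_iff, hle] at h <;> simp only [hA, hZ] at h <;> omega

-- a lowered string never starts with a prefix whose first character is an ASCII capital
lemma pv_lower_no_upper_head (cs : List Char) (c : Char) (rest : List Char)
    (hc : 65 ≤ c.toNat ∧ c.toNat ≤ 90) :
    PySem.Chars.startswith (PySem.Chars.lower cs) (c :: rest) = false := by
  cases cs with
  | nil => rfl
  | cons a as =>
    unfold PySem.Chars.startswith PySem.Chars.lower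
    simp only [List.map, List.isPrefixOf]
    have hne : (c == PySem.Chars.lowerChar a) = false := by
      rw [beq_eq_false_iff_ne]; intro he; exact pv_lowerChar_not_upper a (he ▸ hc)
    simp [hne]

lemma pv_sw_false (k p : String)
    (h : 65 ≤ ((PySem.Str.replace p "_" " ").toList.headD ' ').toNat ∧
         ((PySem.Str.replace p "_" " ").toList.headD ' ').toNat ≤ 90) :
    PySem.Str.startswith (PySem.Str.lower k) (PySem.Str.replace p "_" " ") = false := by
  unfold PySem.Str.startswith PySem.Str.lower
  rcases hm : (PySem.Str.replace p "_" " ").toList with _ | ⟨c, rest⟩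
  · rw [hm] at h; exact absurd h (by decide)
  · rw [hm] at h
    simp only [List.headD_cons] at h
    have hs : (String.ofList (PySem.Chars.lower k.toList)).toList = PySem.Chars.lower k.toList := by
      simp [String.toList_ofList]
    rw [hs]
    exact pv_lower_no_upper_head _ _ _ h

-- the `elif any(...)` test of A's experiment branch never fires
lemma pv_exp_any_false (k : String) :
    (pvExpParamsA.any fun p => PySem.Str.startswith (PySem.Str.lower k) (PySem.Str.replace p "_" " ")) = false := by
  rw [List.any_eq_false]
  intro p hp
  fin_cases hp <;> simp only [Bool.not_eq_true] <;> exact pv_sw_false k _ (by decide)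

lemma pv_step_exp (e el s c u : List (String × String)) (k v : String)
    (h : pvPexp k = true) (he : k ∉ e.map Prod.fst) :
    pvStepA (pvBig e el s c u) (k, v) = pvBig (e ++ [(k, v)]) el s c u := by
  have h' : pvExpParamsA.contains k = true := h
  simp only [pvStepA, pvAssignA, pvCategoriesA, h', beq_self_eq_true, Bool.true_and,
    Bool.true_or, if_true]
  simp [pvBig, PySem.Dict.getD, PySem.Dict.get?, PySem.Dict.insert, PySem.Dict.contains]
  intro x hx
  exact absurd (List.mem_map_of_mem (f := Prod.fst) hx) he

lemma pv_step_el (e el s c u : List (String × String)) (k v : String)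
    (h : pvPel k = true) (he : k ∉ el.map Prod.fst) :
    pvStepA (pvBig e el s c u) (k, v) = pvBig e (el ++ [(k, v)]) s c u := by
  have h1 : pvExpParamsA.contains k = false := by
    have := h; unfold pvPel pvPexp at this
    cases hq : pvExpParamsA.contains k <;> simp_all
  have h2 : pvAnyPrefixB k ["negative_electrode", "positive_electrode", "lithium_plating", "sei"] = true := by
    have := h; unfold pvPel at this; exact (Bool.and_eq_true .. ▸ this).2
  unfold pvAnyPrefixB at h2
  simp only [pvStepA, pvAssignA, pvCategoriesA, h1, h2, pv_exp_any_false, Bool.and_false,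
    Bool.or_false, beq_self_eq_true, if_false, Bool.false_eq_true]
  simp [pvBig, PySem.Dict.getD, PySem.Dict.get?, PySem.Dict.insert, PySem.Dict.contains]
  intro x hx
  exact absurd (List.mem_map_of_mem (f := Prod.fst) hx) he

lemma pv_step_sep (e el s c u : List (String × String)) (k v : String)
    (h : pvPsep k = true) (he : k ∉ s.map Prod.fst) :
    pvStepA (pvBig e el s c u) (k, v) = pvBig e el (s ++ [(k, v)]) c u := by
  simp only [pvPsep, pvPexp, pvAnyPrefixB, Bool.and_eq_true, Bool.not_eq_true'] at h
  obtain ⟨⟨h1, h2⟩, h3⟩ := h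
  simp only [pvStepA, pvAssignA, pvCategoriesA, h1, h2, h3, pv_exp_any_false, Bool.and_false,
    Bool.or_false, Bool.or_true, if_false, if_true, Bool.false_eq_true, Bool.and_eq_true,
    beq_iff_eq, String.reduceEq, false_and, reduceIte]
  simp [pvBig, PySem.Dict.getD, PySem.Dict.get?, PySem.Dict.insert, PySem.Dict.contains]
  intro x hx
  exact absurd (List.mem_map_of_mem (f := Prod.fst) hx) he

lemma pv_step_cell (e el s c u : List (String × String)) (k v : String)
    (h : pvPcell k = true) (he : k ∉ c.map Prod.fst) :
    pvStepA (pvBig e el s c u) (k, v) = pvBig e el s (c ++ [(k, v)]) u := by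
  simp only [pvPcell, pvPexp, pvAnyPrefixB, Bool.and_eq_true, Bool.not_eq_true'] at h
  obtain ⟨⟨⟨h1, h2⟩, h3⟩, h4⟩ := h
  simp only [pvStepA, pvAssignA, pvCategoriesA, h1, h2, h3, h4, pv_exp_any_false, Bool.and_false,
    Bool.or_false, Bool.or_true, if_false, if_true, Bool.false_eq_true, Bool.and_eq_true,
    beq_iff_eq, String.reduceEq, false_and, reduceIte]
  simp [pvBig, PySem.Dict.getD, PySem.Dict.get?, PySem.Dict.insert, PySem.Dict.contains]
  intro x hx
  exact absurd (List.mem_map_of_mem (f := Prod.fst) hx) he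

lemma pv_step_user (e el s c u : List (String × String)) (k v : String)
    (h : pvPuser k = true) (he : k ∉ u.map Prod.fst) :
    pvStepA (pvBig e el s c u) (k, v) = pvBig e el s c (u ++ [(k, v)]) := by
  simp only [pvPuser, pvPexp, pvAnyPrefixB, Bool.and_eq_true, Bool.not_eq_true'] at h
  obtain ⟨⟨⟨h1, h2⟩, h3⟩, h4⟩ := h
  simp only [pvStepA, pvAssignA, pvCategoriesA, h1, h2, h3, h4, pv_exp_any_false, Bool.and_false,
    Bool.or_false, if_false, Bool.false_eq_true, Bool.and_eq_true,
    beq_iff_eq, String.reduceEq, false_and]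
  simp [pvBig, PySem.Dict.getD, PySem.Dict.get?, PySem.Dict.insert, PySem.Dict.contains]
  intro x hx
  exact absurd (List.mem_map_of_mem (f := Prod.fst) hx) he

lemma pv_loopA (l : List (String × String)) : ∀ (e el s c u : List (String × String)),
    (l.map Prod.fst).Nodup →
    (∀ k ∈ l.map Prod.fst, k ∉ e.map Prod.fst ∧ k ∉ el.map Prod.fst ∧ k ∉ s.map Prod.fst ∧
      k ∉ c.map Prod.fst ∧ k ∉ u.map Prod.fst) →
    l.foldl pvStepA (pvBig e el s c u) =
      pvBig (e ++ l.filter (fun kv => pvPexp kv.1)) (el ++ l.filter (fun kv => pvPel kv.1))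
            (s ++ l.filter (fun kv => pvPsep kv.1)) (c ++ l.filter (fun kv => pvPcell kv.1))
            (u ++ l.filter (fun kv => pvPuser kv.1)) := by
  induction l with
  | nil => intro e el s c u _ _; simp
  | cons kv t ih =>
    rintro e el s c u hnd hfresh
    obtain ⟨k, v⟩ := kv
    simp only [List.map_cons, List.nodup_cons] at hnd
    obtain ⟨hkt, hndt⟩ := hnd
    obtain ⟨hk1, hk2, hk3, hk4, hk5⟩ := hfresh k (by simp)
    have hbase : ∀ q ∈ t.map Prod.fst, q ≠ k ∧ q ∉ e.map Prod.fst ∧ q ∉ el.map Prod.fst ∧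
        q ∉ s.map Prod.fst ∧ q ∉ c.map Prod.fst ∧ q ∉ u.map Prod.fst := by
      intro q hq
      obtain ⟨a1, a2, a3, a4, a5⟩ := hfresh q (by simp [hq])
      exact ⟨fun hqe => hkt (hqe ▸ hq), a1, a2, a3, a4, a5⟩
    by_cases hexp : pvPexp k = true
    · have hfr : ∀ q ∈ t.map Prod.fst, q ∉ (e ++ [(k, v)]).map Prod.fst ∧
          q ∉ el.map Prod.fst ∧ q ∉ s.map Prod.fst ∧ q ∉ c.map Prod.fst ∧ q ∉ u.map Prod.fst := by
        intro q hq
        obtain ⟨a0, a1, a2, a3, a4, a5⟩ := hbase q hq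
        exact ⟨by simp [List.map_append, a1, a0], a2, a3, a4, a5⟩
      rw [List.foldl_cons, pv_step_exp e el s c u k v hexp hk1, ih _ el s c u hndt hfr]
      have hel : pvPel k = false := by simp [pvPel, hexp]
      have hsep : pvPsep k = false := by simp [pvPsep, hexp]
      have hcell : pvPcell k = false := by simp [pvPcell, hexp]
      have huser : pvPuser k = false := by simp [pvPuser, hexp]
      simp [hexp, hel, hsep, hcell, huser]
    · have hexp' : pvPexp k = false := Bool.eq_false_iff.mpr hexp
      by_cases hael : pvAnyPrefixB k ["negative_electrode", "positive_electrode", "lithium_plating", "sei"] = true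
      · have hpel : pvPel k = true := by simp [pvPel, hexp', hael]
        have hfr : ∀ q ∈ t.map Prod.fst, q ∉ e.map Prod.fst ∧
            q ∉ (el ++ [(k, v)]).map Prod.fst ∧ q ∉ s.map Prod.fst ∧ q ∉ c.map Prod.fst ∧ q ∉ u.map Prod.fst := by
          intro q hq
          obtain ⟨a0, a1, a2, a3, a4, a5⟩ := hbase q hq
          exact ⟨a1, by simp [List.map_append, a2, a0], a3, a4, a5⟩
        rw [List.foldl_cons, pv_step_el e el s c u k v hpel hk2, ih e _ s c u hndt hfr]
        have hsep : pvPsep k = false := by simp [pvPsep, hael]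
        have hcell : pvPcell k = false := by simp [pvPcell, hael]
        have huser : pvPuser k = false := by simp [pvPuser, hael]
        simp [hexp', hpel, hsep, hcell, huser]
      · have hael' : pvAnyPrefixB k ["negative_electrode", "positive_electrode", "lithium_plating", "sei"] = false :=
          Bool.eq_false_iff.mpr hael
        by_cases hasep : pvAnyPrefixB k ["separator"] = true
        · have hpsep : pvPsep k = true := by simp [pvPsep, hexp', hael', hasep]
          have hfr : ∀ q ∈ t.map Prod.fst, q ∉ e.map Prod.fst ∧ q ∉ el.map Prod.fst ∧
              q ∉ (s ++ [(k, v)]).map Prod.fst ∧ q ∉ c.map Prod.fst ∧ q ∉ u.map Prod.fst := by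
            intro q hq
            obtain ⟨a0, a1, a2, a3, a4, a5⟩ := hbase q hq
            exact ⟨a1, a2, by simp [List.map_append, a3, a0], a4, a5⟩
          rw [List.foldl_cons, pv_step_sep e el s c u k v hpsep hk3, ih e el _ c u hndt hfr]
          have hpel : pvPel k = false := by simp [pvPel, hael']
          have hcell : pvPcell k = false := by simp [pvPcell, hasep]
          have huser : pvPuser k = false := by simp [pvPuser, hasep]
          simp [hexp', hpel, hpsep, hcell, huser]
        · have hasep' : pvAnyPrefixB k ["separator"] = false := Bool.eq_false_iff.mpr hasep
          by_cases hacell : pvAnyPrefixB k ["cell", "negative current collector", "positive current collector"] = true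
          · have hpcell : pvPcell k = true := by simp [pvPcell, hexp', hael', hasep', hacell]
            have hfr : ∀ q ∈ t.map Prod.fst, q ∉ e.map Prod.fst ∧ q ∉ el.map Prod.fst ∧
                q ∉ s.map Prod.fst ∧ q ∉ (c ++ [(k, v)]).map Prod.fst ∧ q ∉ u.map Prod.fst := by
              intro q hq
              obtain ⟨a0, a1, a2, a3, a4, a5⟩ := hbase q hq
              exact ⟨a1, a2, a3, by simp [List.map_append, a4, a0], a5⟩
            rw [List.foldl_cons, pv_step_cell e el s c u k v hpcell hk4, ih e el s _ u hndt hfr]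
            have hpel : pvPel k = false := by simp [pvPel, hael']
            have hpsep : pvPsep k = false := by simp [pvPsep, hasep']
            have huser : pvPuser k = false := by simp [pvPuser, hacell]
            simp [hexp', hpel, hpsep, hpcell, huser]
          · have hacell' : pvAnyPrefixB k ["cell", "negative current collector", "positive current collector"] = false :=
              Bool.eq_false_iff.mpr hacell
            have hpuser : pvPuser k = true := by simp [pvPuser, hexp', hael', hasep', hacell']
            have hfr : ∀ q ∈ t.map Prod.fst, q ∉ e.map Prod.fst ∧ q ∉ el.map Prod.fst ∧
                q ∉ s.map Prod.fst ∧ q ∉ c.map Prod.fst ∧ q ∉ (u ++ [(k, v)]).map Prod.fst := by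
              intro q hq
              obtain ⟨a0, a1, a2, a3, a4, a5⟩ := hbase q hq
              exact ⟨a1, a2, a3, a4, by simp [List.map_append, a5, a0]⟩
            rw [List.foldl_cons, pv_step_user e el s c u k v hpuser hk5, ih e el s c _ hndt hfr]
            have hpel : pvPel k = false := by simp [pvPel, hael']
            have hpsep : pvPsep k = false := by simp [pvPsep, hasep']
            have hpcell : pvPcell k = false := by simp [pvPcell, hacell']
            simp [hexp', hpel, hpsep, hpcell, hpuser]

lemma pv_A_filters (bd : List (String × String)) (hnd : (bd.map Prod.fst).Nodup) :
    create_nested_parameter_dict bd =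
      [("experiment", bd.filter (fun kv => pvPexp kv.1)),
       ("electrode", bd.filter (fun kv => pvPel kv.1)),
       ("separator", bd.filter (fun kv => pvPsep kv.1)),
       ("cell", bd.filter (fun kv => pvPcell kv.1)),
       ("user-defined", bd.filter (fun kv => pvPuser kv.1))] := by
  show ((bd.foldl pvStepA (pvBig [] [] [] [] [])).items).map (fun p => (p.1, p.2.items)) =
    [("experiment", bd.filter (fun kv => pvPexp kv.1)),
     ("electrode", bd.filter (fun kv => pvPel kv.1)),
     ("separator", bd.filter (fun kv => pvPsep kv.1)),
     ("cell", bd.filter (fun kv => pvPcell kv.1)),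
     ("user-defined", bd.filter (fun kv => pvPuser kv.1))]
  rw [pv_loopA bd [] [] [] [] [] hnd (fun q _ => by simp)]
  rfl

lemma pv_mem_keys_filter (bd : List (String × String)) (g : String → Bool) (q : String) :
    q ∈ (bd.filter (fun kv => g kv.1)).map Prod.fst ↔ q ∈ bd.map Prod.fst ∧ g q = true := by
  simp only [List.mem_map, List.mem_filter]
  constructor
  · rintro ⟨p, ⟨hp, hg⟩, rfl⟩; exact ⟨⟨p, hp, rfl⟩, hg⟩
  · rintro ⟨⟨p, hp, rfl⟩, hg⟩; exact ⟨p, ⟨hp, hg⟩, rfl⟩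

lemma pv_B_filters (bd : List (String × String)) :
    create_nested_parameter_dict_alt bd =
      [("experiment", bd.filter (fun kv => pvPexp kv.1)),
       ("electrode", bd.filter (fun kv => pvPel kv.1)),
       ("separator", bd.filter (fun kv => pvPsep kv.1)),
       ("cell", bd.filter (fun kv => pvPcell kv.1)),
       ("user-defined", bd.filter (fun kv => pvPuser kv.1))] := by
  unfold create_nested_parameter_dict_alt pvPrefixGroupsB
  simp only [List.foldl_cons, List.foldl_nil]
  have h0 : bd.filter (fun kv => (PySem.Set.ofList pvExpKeysB).contains kv.1)
      = bd.filter (fun kv => pvPexp kv.1) := by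
    apply List.filter_congr; intro kv _
    have hself : PySem.Set.ofList pvExpKeysB = pvExpKeysB :=
      PySem.Set.ofList_eq_self_of_nodup pvExpKeysB (by decide)
    rw [hself]
    rfl
  rw [h0]
  have m1 : ∀ q ∈ bd.map Prod.fst, (PySem.Set.ofList ((bd.filter (fun kv => pvPexp kv.1)).map Prod.fst)).contains q = pvPexp q := by
    intro q hq
    apply Bool.coe_iff_coe.mp
    rw [PySem.Set.contains_iff, PySem.Set.mem_ofList, pv_mem_keys_filter]
    simp [hq]
  have h1 : bd.filter (fun kv => !(PySem.Set.ofList ((bd.filter (fun kv => pvPexp kv.1)).map Prod.fst)).contains kv.1 && pvAnyPrefixB kv.1 ["negative_electrode", "positive_electrode", "lithium_plating", "sei"])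
      = bd.filter (fun kv => pvPel kv.1) := by
    apply List.filter_congr; intro kv hkv
    rw [m1 kv.1 (List.mem_map_of_mem (f := Prod.fst) hkv)]
    rfl
  rw [h1]
  have m2 : ∀ q ∈ bd.map Prod.fst, ((PySem.Set.ofList ((bd.filter (fun kv => pvPexp kv.1)).map Prod.fst)).update ((bd.filter (fun kv => pvPel kv.1)).map Prod.fst)).contains q = (pvPexp q || pvPel q) := by
    intro q hq
    apply Bool.coe_iff_coe.mp
    rw [PySem.Set.contains_iff, PySem.Set.mem_update, PySem.Set.mem_ofList,
      pv_mem_keys_filter, pv_mem_keys_filter]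
    simp [hq]
  have h2 : bd.filter (fun kv => !((PySem.Set.ofList ((bd.filter (fun kv => pvPexp kv.1)).map Prod.fst)).update ((bd.filter (fun kv => pvPel kv.1)).map Prod.fst)).contains kv.1 && pvAnyPrefixB kv.1 ["separator"])
      = bd.filter (fun kv => pvPsep kv.1) := by
    apply List.filter_congr; intro kv hkv
    rw [m2 kv.1 (List.mem_map_of_mem (f := Prod.fst) hkv)]
    unfold pvPsep pvPel
    cases (pvPexp kv.1) <;> cases (pvAnyPrefixB kv.1 ["negative_electrode", "positive_electrode", "lithium_plating", "sei"]) <;> simp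
  rw [h2]
  have m3 : ∀ q ∈ bd.map Prod.fst, (((PySem.Set.ofList ((bd.filter (fun kv => pvPexp kv.1)).map Prod.fst)).update ((bd.filter (fun kv => pvPel kv.1)).map Prod.fst)).update ((bd.filter (fun kv => pvPsep kv.1)).map Prod.fst)).contains q = (pvPexp q || pvPel q || pvPsep q) := by
    intro q hq
    apply Bool.coe_iff_coe.mp
    rw [PySem.Set.contains_iff, PySem.Set.mem_update, PySem.Set.mem_update, PySem.Set.mem_ofList,
      pv_mem_keys_filter, pv_mem_keys_filter, pv_mem_keys_filter]
    simp [hq, or_assoc]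
  have h3 : bd.filter (fun kv => !(((PySem.Set.ofList ((bd.filter (fun kv => pvPexp kv.1)).map Prod.fst)).update ((bd.filter (fun kv => pvPel kv.1)).map Prod.fst)).update ((bd.filter (fun kv => pvPsep kv.1)).map Prod.fst)).contains kv.1 && pvAnyPrefixB kv.1 ["cell", "negative current collector", "positive current collector"])
      = bd.filter (fun kv => pvPcell kv.1) := by
    apply List.filter_congr; intro kv hkv
    rw [m3 kv.1 (List.mem_map_of_mem (f := Prod.fst) hkv)]
    unfold pvPcell pvPsep pvPel
    cases (pvPexp kv.1) <;> cases (pvAnyPrefixB kv.1 ["negative_electrode", "positive_electrode", "lithium_plating", "sei"]) <;> cases (pvAnyPrefixB kv.1 ["separator"]) <;> simp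
  rw [h3]
  have m4 : ∀ q ∈ bd.map Prod.fst, ((((PySem.Set.ofList ((bd.filter (fun kv => pvPexp kv.1)).map Prod.fst)).update ((bd.filter (fun kv => pvPel kv.1)).map Prod.fst)).update ((bd.filter (fun kv => pvPsep kv.1)).map Prod.fst)).update ((bd.filter (fun kv => pvPcell kv.1)).map Prod.fst)).contains q = (pvPexp q || pvPel q || pvPsep q || pvPcell q) := by
    intro q hq
    apply Bool.coe_iff_coe.mp
    rw [PySem.Set.contains_iff, PySem.Set.mem_update, PySem.Set.mem_update, PySem.Set.mem_update,
      PySem.Set.mem_ofList, pv_mem_keys_filter, pv_mem_keys_filter, pv_mem_keys_filter,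
      pv_mem_keys_filter]
    simp [hq, or_assoc]
  have h4 : bd.filter (fun kv => !((((PySem.Set.ofList ((bd.filter (fun kv => pvPexp kv.1)).map Prod.fst)).update ((bd.filter (fun kv => pvPel kv.1)).map Prod.fst)).update ((bd.filter (fun kv => pvPsep kv.1)).map Prod.fst)).update ((bd.filter (fun kv => pvPcell kv.1)).map Prod.fst)).contains kv.1)
      = bd.filter (fun kv => pvPuser kv.1) := by
    apply List.filter_congr; intro kv hkv
    rw [m4 kv.1 (List.mem_map_of_mem (f := Prod.fst) hkv)]
    unfold pvPuser pvPcell pvPsep pvPel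
    cases (pvPexp kv.1) <;> cases (pvAnyPrefixB kv.1 ["negative_electrode", "positive_electrode", "lithium_plating", "sei"]) <;> cases (pvAnyPrefixB kv.1 ["separator"]) <;>
      cases pvAnyPrefixB kv.1 ["cell", "negative current collector", "positive current collector"] <;> simp
  rw [h4]
  rfl

-- ===== VERDICT (by name: the statement is the Claim_ definition above) =====
theorem create_nested_parameter_dict_spec : Claim_equal_create_nested_parameter_dict := by
  intro bd _ hpre
  unfold Spec_create_nested_parameter_dict
  rw [pv_A_filters bd hpre, pv_B_filters bd]
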